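-- pv_equiv track=rewrite | github.com/tjdud0123/daily_algorithm | 카카오 겨울인턴2019/불량 사용자.py | solution
-- ===== SOURCE A (Python) =====
-- from collections import defaultdict
-- import itertools
--
-- def solution(user_id, banned_id):
--     cand = defaultdict(set) # {'fr*d*': {'frodo', 'fradi'}, 'abc1**': {'abc123'}}
--     count = 0
--
--     for bid in banned_id:
--         for uid in user_id:
--             if len(uid) != len(bid): # 길이가 다르면 스킵
--                 continue
--             for u, b in zip(uid, bid): # zip으로 비교
--                 if u != b and b != '*':
--                     break;
--             else: # 다 만족했을 때
--                 cand[bid].add(uid)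
--
--     temp = [] # [{'frodo', 'fradi'}, {'abc123'}]
--     for bid in banned_id:
--         if cand[bid]: # 해당 아이디가 있다면
--             temp.append(cand[bid])
--
--     temp2 = itertools.product(*temp) # [('fradi', 'abc123'), ('frodo', 'abc123')]
--     result = []
--     for x in map(set, list(temp2)): # 중복제거
--         if len(x) == len(temp) and set(x) not in result: # 중복된게 없고 result에 없으면
--             result.append(set(x))
--             count += 1
--
--     return count
-- ===== SOURCE B (Python) =====
-- def solution(user_id, banned_id):
--     def matches(uid, bid):
--         return len(uid) == len(bid) and all(b == '*' or u == b for u, b in zip(uid, bid))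
--
--     # candidate set per banned pattern, in banned_id order; patterns with no
--     # candidate are skipped (as the original does)
--     temp = []
--     for bid in banned_id:
--         c = {u for u in user_id if matches(u, bid)}
--         if c:
--             temp.append(c)
--
--     found = set()
--
--     def dfs(i, used):
--         if i == len(temp):
--             found.add(frozenset(used))
--             return
--         for u in temp[i]:
--             if u not in used:
--                 used.append(u)
--                 dfs(i + 1, used)
--                 used.pop()
--
--     dfs(0, [])
--     return len(found)
-- ===== Notes on version B (the rewrite author's own statement) =====
-- stated objective: alternative
-- what changed: Replaces A's dict-of-sets plus full itertools.product enumeration (filtering out tuples with repeated users and deduplicating afterwards) by per-pattern candidate sets built with a comprehension and a DFS/backtracking that prunes already-used users early and collects the distinct assignment sets directly.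
import Mathlib
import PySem

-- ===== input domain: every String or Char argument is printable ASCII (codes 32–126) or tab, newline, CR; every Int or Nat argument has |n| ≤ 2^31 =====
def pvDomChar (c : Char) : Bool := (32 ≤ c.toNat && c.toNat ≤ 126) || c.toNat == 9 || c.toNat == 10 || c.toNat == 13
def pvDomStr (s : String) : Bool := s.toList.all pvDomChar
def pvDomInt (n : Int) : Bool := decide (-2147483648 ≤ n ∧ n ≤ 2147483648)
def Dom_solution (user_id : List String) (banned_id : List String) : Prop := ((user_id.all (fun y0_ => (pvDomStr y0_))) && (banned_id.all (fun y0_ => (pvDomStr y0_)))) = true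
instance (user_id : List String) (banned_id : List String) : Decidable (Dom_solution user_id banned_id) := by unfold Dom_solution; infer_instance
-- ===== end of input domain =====

-- B replaces A's "enumerate the full itertools.product, then filter tuples with repeats and
-- dedup" by a DFS/backtracking over the candidate sets that prunes already-used users early
-- and collects the distinct assignment sets directly (objective: alternative decomposition).

-- ===== PORT A =====
-- the inner 'for u, b in zip(uid, bid): if u != b and b != '*': break / else: add'
def pvMatchLoop : List (Char × Char) → Bool
  | [] => true
  | (u, b) :: rest => if u != b && b != '*' then false else pvMatchLoop rest

-- the first double loop building cand = defaultdict(set); cand[bid].add(uid) = modify with default ∅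
def pvCand (user_id : List String) (banned_id : List String) : PySem.Dict String (PySem.Set String) :=
  banned_id.foldl (fun cand bid =>
    user_id.foldl (fun cand uid =>
      if PySem.Str.len uid != PySem.Str.len bid then cand
      else if pvMatchLoop (uid.toList.zip bid.toList) then
        cand.modify bid PySem.Set.empty (fun s => PySem.Set.add s uid)
      else cand) cand) PySem.Dict.empty

-- itertools.product(*temp), tuples as lists (first factor slowest, as itertools does)
def pvProd : List (PySem.Set String) → List (List String)
  | [] => [[]]
  | xs :: rest => xs.flatMap (fun x => (pvProd rest).map (fun t => x :: t))

def solution (user_id : List String) (banned_id : List String) : Int :=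
  let cand := pvCand user_id banned_id
  -- 'if cand[bid]' reads the (fully built) dict; the defaultdict's silent insertion of an
  -- empty set for a missing bid is unobservable through getD with the same default
  let temp : List (PySem.Set String) :=
    banned_id.foldl (fun t bid =>
      let s := cand.getD bid PySem.Set.empty
      if s.isEmpty then t else t ++ [s]) []
  -- result list + count; 'set(x) not in result' is list membership by set equality
  let rc : List (PySem.Set String) × Int :=
    (pvProd temp).foldl (fun rc t =>
      let x : PySem.Set String := PySem.Set.ofList t
      if PySem.Set.len x == PySem.List.len temp && !(rc.1.any (fun y => PySem.Set.equal y x))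
      then (rc.1 ++ [x], rc.2 + 1) else rc) ([], 0)
  rc.2

-- ===== PORT B =====
def pvMatches (uid : String) (bid : String) : Bool :=
  PySem.Str.len uid == PySem.Str.len bid &&
    (uid.toList.zip bid.toList).all (fun p => p.2 == '*' || p.1 == p.2)

-- dfs(i, used): 'found' is a Python set of frozensets, modelled as an insertion-order list
-- deduplicated by set equality (exact: frozenset '==' is set equality, len is order-free)
mutual
def pvDfs : List (PySem.Set String) → List String → List (PySem.Set String) → List (PySem.Set String)
  | [], used, found =>
      let x : PySem.Set String := PySem.Set.ofList used
      if found.any (fun y => PySem.Set.equal y x) then found else found ++ [x]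
  | c :: rest, used, found => pvDfsRow c rest used found
  termination_by temp _ _ => (temp.length, 0)

-- the 'for u in temp[i]' loop of dfs
def pvDfsRow : List String → List (PySem.Set String) → List String → List (PySem.Set String) → List (PySem.Set String)
  | [], _, _, found => found
  | u :: us, rest, used, found =>
      pvDfsRow us rest used (if used.contains u then found else pvDfs rest (used ++ [u]) found)
  termination_by c rest _ _ => (rest.length, c.length)
end

def solution_alt (user_id : List String) (banned_id : List String) : Int :=
  let temp : List (PySem.Set String) :=
    banned_id.foldl (fun t bid =>
      let c : PySem.Set String := PySem.Set.ofList (user_id.filter (fun u => pvMatches u bid))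
      if c.isEmpty then t else t ++ [c]) []
  ((pvDfs temp [] []).length : Int)

-- ===== PRECONDITION & SPEC =====
def Spec_solution (user_id : List String) (banned_id : List String) (out : Int) : Prop := out = solution_alt user_id banned_id
instance (user_id : List String) (banned_id : List String) (out : Int) : Decidable (Spec_solution user_id banned_id out) := by unfold Spec_solution; infer_instance

-- ===== CLAIM (what is proved, stated in full; the proofs are below) =====
def Claim_equal_solution : Prop := ∀ (user_id : List String) (banned_id : List String), Dom_solution user_id banned_id → Spec_solution user_id banned_id (solution user_id banned_id)

-- ===== LEMMAS AND PROOFS =====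

-- 'found.add(frozenset(used))' / 'result.append' step: insert-if-absent by set equality
def pvInsertS (res : List (PySem.Set String)) (x : PySem.Set String) : List (PySem.Set String) :=
  if res.any (fun y => PySem.Set.equal y x) then res else res ++ [x]

-- the common normal form both programs are reduced to
def pvStep (used : List String) (r : List (PySem.Set String)) (t : List String) : List (PySem.Set String) :=
  if (used ++ t).Nodup then pvInsertS r (PySem.Set.ofList (used ++ t)) else r

theorem pv_matchLoop_eq (l : List (Char × Char)) :
    pvMatchLoop l = l.all (fun p => p.2 == '*' || p.1 == p.2) := by
  induction l with
  | nil => rfl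
  | cons p rest ih =>
    obtain ⟨u, b⟩ := p
    simp only [pvMatchLoop, List.all_cons, ih]
    cases hub : (u == b) <;> cases hb : (b == '*') <;>
      simp [bne, hub, hb]

def pvTarget (user_id : List String) (bid : String) : PySem.Set String :=
  PySem.Set.ofList (user_id.filter (fun u => pvMatches u bid))

-- the body of A's outer loop (identical text to the step function inside pvCand)
def pvInner (user_id : List String) (cand : PySem.Dict String (PySem.Set String)) (bid : String) :
    PySem.Dict String (PySem.Set String) :=
  user_id.foldl (fun cand uid =>
    if PySem.Str.len uid != PySem.Str.len bid then cand
    else if pvMatchLoop (uid.toList.zip bid.toList) then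
      cand.modify bid PySem.Set.empty (fun s => PySem.Set.add s uid)
    else cand) cand

theorem pv_getD_modify_foldl (l : List String) (bid k : String) :
    ∀ d : PySem.Dict String (PySem.Set String),
      (l.foldl (fun d u => d.modify bid PySem.Set.empty (fun s => PySem.Set.add s u)) d).getD k PySem.Set.empty
      = if k = bid then PySem.Set.update (d.getD bid PySem.Set.empty) l else d.getD k PySem.Set.empty := by
  induction l with
  | nil =>
    intro d
    simp only [List.foldl_nil, PySem.Set.update_nil]
    split_ifs with h
    · rw [h]
    · rfl
  | cons u us ih =>
    intro d
    simp only [List.foldl_cons, ih, PySem.Dict.getD_modify, PySem.Set.update_cons]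
    split_ifs <;> rfl

theorem pv_inner_getD (user_id : List String) (bid k : String)
    (d : PySem.Dict String (PySem.Set String)) :
    (pvInner user_id d bid).getD k PySem.Set.empty
    = if k = bid then
        PySem.Set.update (d.getD bid PySem.Set.empty) (user_id.filter (fun u => pvMatches u bid))
      else d.getD k PySem.Set.empty := by
  unfold pvInner
  have hstep : (fun (cand : PySem.Dict String (PySem.Set String)) (uid : String) =>
      if PySem.Str.len uid != PySem.Str.len bid then cand
      else if pvMatchLoop (uid.toList.zip bid.toList) then
        cand.modify bid PySem.Set.empty (fun s => PySem.Set.add s uid)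
      else cand)
    = (fun cand uid => if pvMatches uid bid then
        cand.modify bid PySem.Set.empty (fun s => PySem.Set.add s uid) else cand) := by
    funext cand uid
    simp only [pvMatches, pv_matchLoop_eq, bne]
    by_cases h1 : PySem.Str.len uid = PySem.Str.len bid <;>
      by_cases h2 : ((uid.toList.zip bid.toList).all (fun p => p.2 == '*' || p.1 == p.2)) = true <;>
        simp [h2]
  rw [hstep, PySem.List.foldl_if_eq_foldl_filter]
  exact pv_getD_modify_foldl _ _ _ d

theorem pv_update_target (s : PySem.Set String) (l : List String)
    (h : s = PySem.Set.ofList l ∨ s = PySem.Set.empty) :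
    PySem.Set.update s l = PySem.Set.ofList l := by
  rcases h with h | h
  · subst h
    rw [PySem.Set.update_eq_append_filter]
    have : (PySem.Set.ofList l).filter (fun y => !(PySem.Set.contains (PySem.Set.ofList l) y)) = [] := by
      rw [List.filter_eq_nil_iff]
      intro y hy
      simp only [Bool.not_eq_eq_eq_not, Bool.not_true]
      simp
      exact (PySem.Set.mem_ofList l y).mp hy
    rw [this, List.append_nil]
  · subst h
    exact PySem.Set.update_nil_left l

def pvInv (user_id : List String) (d : PySem.Dict String (PySem.Set String)) : Prop :=
  ∀ k, d.getD k PySem.Set.empty = pvTarget user_id k ∨ d.getD k PySem.Set.empty = PySem.Set.empty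

theorem pv_inner_inv (user_id : List String) (d : PySem.Dict String (PySem.Set String))
    (bid : String) (h : pvInv user_id d) : pvInv user_id (pvInner user_id d bid) := by
  intro k
  rw [pv_inner_getD]
  split_ifs with hk
  · subst hk
    left
    exact pv_update_target _ _ (by rcases h k with h' | h' <;> simp [pvTarget] at h' <;> simp [h'])
  · exact h k

theorem pv_inner_getD_self (user_id : List String) (d : PySem.Dict String (PySem.Set String))
    (bid : String) (h : pvInv user_id d) :
    (pvInner user_id d bid).getD bid PySem.Set.empty = pvTarget user_id bid := by
  rw [pv_inner_getD, if_pos rfl]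
  exact pv_update_target _ _ (by rcases h bid with h' | h' <;> simp [pvTarget] at h' <;> simp [h'])

theorem pv_keep (user_id : List String) (bids : List String) :
    ∀ (d : PySem.Dict String (PySem.Set String)) (k : String), pvInv user_id d →
      d.getD k PySem.Set.empty = pvTarget user_id k →
      (bids.foldl (pvInner user_id) d).getD k PySem.Set.empty = pvTarget user_id k := by
  induction bids with
  | nil => intro d k _ hk; simpa using hk
  | cons b bs ih =>
    intro d k hinv hk
    simp only [List.foldl_cons]
    refine ih _ _ (pv_inner_inv _ _ _ hinv) ?_
    rw [pv_inner_getD]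
    split_ifs with hb
    · subst hb
      exact pv_update_target _ _ (Or.inl (by simpa [pvTarget] using hk))
    · exact hk

theorem pv_cand_getD (user_id banned_id : List String) (bid : String) (h : bid ∈ banned_id) :
    (pvCand user_id banned_id).getD bid PySem.Set.empty = pvTarget user_id bid := by
  have main : ∀ (bids : List String) (d : PySem.Dict String (PySem.Set String)),
      pvInv user_id d → ∀ k ∈ bids,
        (bids.foldl (pvInner user_id) d).getD k PySem.Set.empty = pvTarget user_id k := by
    intro bids
    induction bids with
    | nil => intro d _ k hk; simp at hk
    | cons b bs ih =>
      intro d hinv k hk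
      simp only [List.foldl_cons]
      rcases List.mem_cons.mp hk with rfl | hk
      · exact pv_keep _ _ _ _ (pv_inner_inv _ _ _ hinv) (pv_inner_getD_self _ _ _ hinv)
      · exact ih _ (pv_inner_inv _ _ _ hinv) k hk
  have : pvCand user_id banned_id = banned_id.foldl (pvInner user_id) PySem.Dict.empty := rfl
  rw [this]
  exact main banned_id PySem.Dict.empty (fun k => Or.inr (PySem.Dict.getD_empty ..)) bid h

theorem pv_temp_eq (user_id banned_id : List String) :
    banned_id.foldl (fun t bid =>
      let s := (pvCand user_id banned_id).getD bid PySem.Set.empty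
      if s.isEmpty then t else t ++ [s]) [] =
    banned_id.foldl (fun t bid =>
      let c : PySem.Set String := PySem.Set.ofList (user_id.filter (fun u => pvMatches u bid))
      if c.isEmpty then t else t ++ [c]) [] := by
  apply PySem.List.foldl_congr_mem
  intro acc bid hb
  simp only [pv_cand_getD user_id banned_id bid hb, pvTarget]

theorem pv_mem_prod_length (temp : List (PySem.Set String)) (t : List String)
    (h : t ∈ pvProd temp) : t.length = temp.length := by
  induction temp generalizing t with
  | nil => simp [pvProd] at h; simp [h]
  | cons c rest ih =>
    simp only [pvProd, List.mem_flatMap, List.mem_map] at h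
    obtain ⟨x, -, t', ht', rfl⟩ := h
    simp [ih t' ht']

theorem pv_foldl_add_sublist (t : List String) : ∀ (s : PySem.Set String),
    ∃ l', List.Sublist l' t ∧ t.foldl PySem.Set.add s = s ++ l' := by
  induction t with
  | nil => exact fun s => ⟨[], List.Sublist.refl _, by simp⟩
  | cons x xs ih =>
    intro s
    simp only [List.foldl_cons]
    by_cases hx : x ∈ s
    · obtain ⟨l', hl', he⟩ := ih s
      exact ⟨l', hl'.cons _, by rwa [PySem.Set.add_of_mem hx]⟩
    · obtain ⟨l', hl', he⟩ := ih (s ++ [x])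
      exact ⟨x :: l', hl'.cons₂ _, by rw [PySem.Set.add_of_not_mem hx, he, List.append_assoc]; rfl⟩

theorem pv_ofList_length_iff (t : List String) :
    (PySem.Set.ofList t).length = t.length ↔ t.Nodup := by
  constructor
  · intro h
    obtain ⟨l', hl', he⟩ := pv_foldl_add_sublist t []
    have he' : PySem.Set.ofList t = l' := by rw [PySem.Set.ofList_eq_foldl, he]; simp
    have : l' = t := hl'.eq_of_length (by rw [← he', h])
    rw [← this, ← he']
    exact PySem.Set.nodup_ofList t
  · intro h
    rw [PySem.Set.ofList_eq_self_of_nodup _ h]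

def pvCond (T : List (PySem.Set String)) (r : List (PySem.Set String)) (t : List String) : Bool :=
  PySem.Set.len (PySem.Set.ofList t) == PySem.List.len T
    && !(r.any (fun y => PySem.Set.equal y (PySem.Set.ofList t)))

theorem pv_count_pair (T : List (PySem.Set String)) (ts : List (List String)) :
    ∀ (r : List (PySem.Set String)) (c : Int), c = (r.length : Int) →
    ts.foldl (fun rc t => if pvCond T rc.1 t then (rc.1 ++ [PySem.Set.ofList t], rc.2 + 1) else rc) (r, c)
      = (ts.foldl (fun r t => if pvCond T r t then r ++ [PySem.Set.ofList t] else r) r,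
         ((ts.foldl (fun r t => if pvCond T r t then r ++ [PySem.Set.ofList t] else r) r).length : Int)) := by
  induction ts with
  | nil => intro r c hc; simp [hc]
  | cons t ts ih =>
    intro r c hc
    simp only [List.foldl_cons]
    by_cases hg : pvCond T r t = true
    · simp only [hg, if_true]
      exact ih _ _ (by simp [hc])
    · simp only [Bool.not_eq_true] at hg
      simp only [hg, Bool.false_eq_true, if_false]
      exact ih _ _ hc

theorem pv_foldl_flatMap {α β γ : Type} (g : α → List β) (f : γ → β → γ) :
    ∀ (l : List α) (a : γ), (l.flatMap g).foldl f a = l.foldl (fun a x => (g x).foldl f a) a := by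
  intro l
  induction l with
  | nil => intro a; rfl
  | cons x xs ih => intro a; simp only [List.flatMap_cons, List.foldl_append, List.foldl_cons, ih]

theorem pv_dfs_eq (rest : List (PySem.Set String)) :
    ∀ (used : List String) (found : List (PySem.Set String)), used.Nodup →
      pvDfs rest used found = (pvProd rest).foldl (pvStep used) found := by
  induction rest with
  | nil =>
    intro used found hnd
    simp only [pvProd, List.foldl_cons, List.foldl_nil, pvStep, List.append_nil]
    rw [if_pos hnd]
    simp [pvDfs, pvInsertS]
  | cons c rest ih =>
    intro used found hnd
    have row : ∀ (cs : List String) (found : List (PySem.Set String)),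
        pvDfsRow cs rest used found
          = cs.foldl (fun f u => (pvProd rest).foldl (fun r t => pvStep used r (u :: t)) f) found := by
      intro cs
      induction cs with
      | nil => intro found; simp [pvDfsRow]
      | cons u us ihc =>
        intro found
        simp only [pvDfsRow, List.foldl_cons]
        rw [ihc]
        congr 1
        by_cases hu : u ∈ used
        · rw [if_pos (by simpa using hu)]
          have hfix : List.foldl (fun r t => pvStep used r (u :: t)) found (pvProd rest) = found := by
            have h1 : List.foldl (fun r t => pvStep used r (u :: t)) found (pvProd rest)
                = List.foldl (fun r (_ : List String) => r) found (pvProd rest) := by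
              apply PySem.List.foldl_congr_mem
              intro r t _
              simp only [pvStep]
              rw [if_neg]
              intro hN
              exact (List.nodup_append.mp hN).2.2 u hu u List.mem_cons_self rfl
            rw [h1, PySem.List.foldl_ignore]
          exact hfix.symm
        · rw [if_neg (by simpa using hu)]
          rw [ih (used ++ [u]) found
            (by
              rw [List.nodup_append]
              exact ⟨hnd, List.nodup_singleton u, by intro a ha b hb h'; simp at hb; subst hb; subst h'; exact hu ha⟩)]
          apply PySem.List.foldl_congr_mem
          intro r t _
          simp [pvStep, List.append_assoc]
    simp only [pvDfs]
    rw [row c found]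
    simp only [pvProd]
    rw [pv_foldl_flatMap]
    simp only [List.foldl_map]

-- ===== VERDICT (by name: the statement is the Claim_ definition above) =====
theorem pv_cond_eq_step (T : List (PySem.Set String)) (t : List String) (ht : t ∈ pvProd T)
    (r : List (PySem.Set String)) :
    (if pvCond T r t then r ++ [PySem.Set.ofList t] else r) = pvStep [] r t := by
  have hlen : t.length = T.length := pv_mem_prod_length T t ht
  have hcond : pvCond T r t
      = (decide t.Nodup && !(r.any (fun y => PySem.Set.equal y (PySem.Set.ofList t)))) := by
    unfold pvCond
    congr 1
    by_cases hN : t.Nodup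
    · simp only [hN, decide_true]
      rw [PySem.Set.ofList_eq_self_of_nodup _ hN]
      simp [PySem.Set.len, PySem.List.len, hlen]
    · simp only [hN, decide_false]
      rw [Bool.eq_false_iff]
      intro hEq
      have h1 : ((PySem.Set.ofList t).length : Int) = (T.length : Int) := by
        simpa [PySem.Set.len, PySem.List.len] using hEq
      have h2 : (PySem.Set.ofList t).length = t.length := by
        rw [hlen]; exact_mod_cast h1
      exact hN ((pv_ofList_length_iff t).mp h2)
  rw [hcond, pvStep, pvInsertS]
  simp only [List.nil_append]
  by_cases hN : t.Nodup
  · simp only [hN, decide_true, Bool.true_and, if_true]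
    cases hA : r.any (fun y => PySem.Set.equal y (PySem.Set.ofList t)) <;> simp
  · simp [hN]

theorem pv_fold_eq_dfs (T : List (PySem.Set String)) :
    (List.foldl (fun rc t => if pvCond T rc.1 t then (rc.1 ++ [PySem.Set.ofList t], rc.2 + 1) else rc)
        ([], 0) (pvProd T)).2
      = ((pvDfs T [] []).length : Int) := by
  rw [pv_count_pair T (pvProd T) [] 0 (by simp)]
  rw [pv_dfs_eq T [] [] List.nodup_nil]
  have h : List.foldl (fun r t => if pvCond T r t then r ++ [PySem.Set.ofList t] else r) [] (pvProd T)
      = List.foldl (pvStep []) [] (pvProd T) := by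
    apply PySem.List.foldl_congr_mem
    intro r t ht
    exact pv_cond_eq_step T t ht r
  rw [h]

theorem solution_spec : Claim_equal_solution := by
  intro user_id banned_id _
  show (List.foldl
      (fun rc t =>
        if pvCond (List.foldl (fun t bid =>
              let s := (pvCand user_id banned_id).getD bid PySem.Set.empty
              if s.isEmpty then t else t ++ [s]) []  banned_id) rc.1 t
        then (rc.1 ++ [PySem.Set.ofList t], rc.2 + 1) else rc)
      ([], 0)
      (pvProd (List.foldl (fun t bid =>
              let s := (pvCand user_id banned_id).getD bid PySem.Set.empty
              if s.isEmpty then t else t ++ [s]) [] banned_id))).2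
    = ((pvDfs (List.foldl (fun t bid =>
              let c : PySem.Set String := PySem.Set.ofList (user_id.filter (fun u => pvMatches u bid))
              if c.isEmpty then t else t ++ [c]) [] banned_id) [] []).length : Int)
  rw [pv_temp_eq]
  exact pv_fold_eq_dfs _
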